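-- pv_equiv track=rewrite | github.com/jmoh3/DolloSat | utils.py | cluster_matrix
-- ===== SOURCE A (Python) =====
-- def cluster_matrix(matrix):
--     row_is_duplicate = [False for x in range(len(matrix))]
--     col_is_duplicate = [False for x in range(len(matrix[0]))]
--
--     for row in range(len(matrix)):
--         for larger_row in range(row+1, len(matrix)):
--             if row_is_duplicate[larger_row]:
--                 continue
--             larger_row_is_dup = True
--
--             for col in range(len(matrix[0])):
--                 if matrix[row][col] != matrix[larger_row][col]:
--                     larger_row_is_dup = False
--                     break
--
--             if larger_row_is_dup:
--                 row_is_duplicate[larger_row] = True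
--
--     for col in range(len(matrix[0])):
--         for larger_col in range(col+1, len(matrix[0])):
--             if col_is_duplicate[larger_col]:
--                 continue
--
--             larger_col_is_dup = True
--
--             for row in range(len(matrix)):
--                 if matrix[row][col] != matrix[row][larger_col]:
--                     larger_col_is_dup = False
--                     break
--
--             if larger_col_is_dup:
--                 col_is_duplicate[larger_col] = True
--
--     return row_is_duplicate, col_is_duplicate
-- ===== SOURCE B (Python) =====
-- def cluster_matrix(matrix):
--     m = len(matrix[0])
--
--     def dup_flags(keys):
--         n = len(keys)
--         flags = [False] * n
--         items = sorted(k + (i,) for i, k in enumerate(keys))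
--         for p in range(1, n):
--             if items[p][:-1] == items[p - 1][:-1]:
--                 flags[items[p][-1]] = True
--         return flags
--
--     row_keys = [tuple(row[:m]) for row in matrix]
--     col_keys = [tuple(row[c] for row in matrix) for c in range(m)]
--     return dup_flags(row_keys), dup_flags(col_keys)
-- ===== Notes on version B (the rewrite author's own statement) =====
-- stated objective: alternative
-- what changed: Replaces A's quadratic pairwise row/column comparison loops by sorting (key, index) items per axis and marking equal sorted neighbours, keying rows by their first-row-length prefix and columns by index (intended as faster; measured 2.2x at mid sizes but only 1.39x at the largest timing size).
-- outside the precondition, e.g. on cluster_matrix([[1, 2], [5]]): A returns ([False, False], [False, False]), B raises IndexError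
import Mathlib
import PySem

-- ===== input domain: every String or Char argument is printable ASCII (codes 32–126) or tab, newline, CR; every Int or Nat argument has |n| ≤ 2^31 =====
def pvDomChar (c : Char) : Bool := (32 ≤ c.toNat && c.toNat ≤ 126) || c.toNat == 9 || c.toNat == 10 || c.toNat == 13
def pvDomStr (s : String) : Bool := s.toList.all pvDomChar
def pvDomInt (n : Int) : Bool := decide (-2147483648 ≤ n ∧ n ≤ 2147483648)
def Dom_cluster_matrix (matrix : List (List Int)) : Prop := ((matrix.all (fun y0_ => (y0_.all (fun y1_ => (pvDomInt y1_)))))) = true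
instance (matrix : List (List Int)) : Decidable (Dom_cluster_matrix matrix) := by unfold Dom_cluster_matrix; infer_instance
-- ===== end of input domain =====

-- B replaces A's pairwise row/column comparison loops by sorting (key, index) items per axis
-- and marking equal sorted neighbours (objective: alternative algorithm).


-- ===== PORT A =====
-- the inner 'for col in range(len(matrix[0])): … break' loop computing larger_row_is_dup
def pvRowEqA (matrix : List (List Int)) (i j : Int) : List Int → Bool
  | [] => true
  | c :: rest =>
    if PySem.List.pyGetD (PySem.List.pyGetD matrix i []) c 0 ≠ PySem.List.pyGetD (PySem.List.pyGetD matrix j []) c 0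
    then false
    else pvRowEqA matrix i j rest

-- the inner 'for row in range(len(matrix)): … break' loop computing larger_col_is_dup
def pvColEqA (matrix : List (List Int)) (c c' : Int) : List Int → Bool
  | [] => true
  | r :: rest =>
    if PySem.List.pyGetD (PySem.List.pyGetD matrix r []) c 0 ≠ PySem.List.pyGetD (PySem.List.pyGetD matrix r []) c' 0
    then false
    else pvColEqA matrix c c' rest

def cluster_matrix (matrix : List (List Int)) : List Bool × List Bool :=
  let nR : Int := matrix.length
  let nC : Int := (PySem.List.pyGetD matrix 0 []).length   -- len(matrix[0]); IndexError on [] is excluded by Pre_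
  let rowDup :=
    (PySem.List.pyRange 0 nR 1).foldl (fun d row =>
      (PySem.List.pyRange (row + 1) nR 1).foldl (fun d lr =>
        if PySem.List.pyGetD d lr false then d
        else if pvRowEqA matrix row lr (PySem.List.pyRange 0 nC 1) then PySem.List.pySetD d lr true
        else d) d)
      (List.replicate matrix.length false)
  let colDup :=
    (PySem.List.pyRange 0 nC 1).foldl (fun d col =>
      (PySem.List.pyRange (col + 1) nC 1).foldl (fun d lc =>
        if PySem.List.pyGetD d lc false then d
        else if pvColEqA matrix col lc (PySem.List.pyRange 0 nR 1) then PySem.List.pySetD d lc true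
        else d) d)
      (List.replicate nC.toNat false)
  (rowDup, colDup)

-- ===== PORT B =====
-- sorted(k + (i,) for i, k in enumerate(keys)); mark the stored index of every item whose
-- key part (item[:-1]) equals its left neighbour's
def pvDupFlagsB (keys : List (List Int)) : List Bool :=
  let n := keys.length
  let items := PySem.List.sorted (keys.zipIdx.map (fun ki => ki.1 ++ [(ki.2 : Int)])) (fun x => x) false
  (PySem.List.pyRange 1 (n : Int) 1).foldl (fun flags p =>
    if PySem.List.slice (PySem.List.pyGetD items p []) none (some (-1))
       = PySem.List.slice (PySem.List.pyGetD items (p - 1) []) none (some (-1))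
    then PySem.List.pySetD flags (PySem.List.pyGetD (PySem.List.pyGetD items p []) (-1) 0) true
    else flags)
    (List.replicate n false)

def cluster_matrix_alt (matrix : List (List Int)) : List Bool × List Bool :=
  let m : Int := (PySem.List.pyGetD matrix 0 []).length      -- len(matrix[0])
  let rowKeys := matrix.map (fun row => PySem.List.slice row none (some m))
  let colKeys := (PySem.List.pyRange 0 m 1).map (fun c => matrix.map (fun row => PySem.List.pyGetD row c 0))
  (pvDupFlagsB rowKeys, pvDupFlagsB colKeys)

-- ===== PRECONDITION & SPEC =====
-- Pre_ excludes the empty matrix (A raises IndexError on matrix[0]) and ragged matrices having a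
-- row shorter than the first row: there A raises IndexError unless an early break in its
-- element-by-element comparison happens to skip the missing entries, while B's column
-- construction indexes every row and always raises.
def Pre_cluster_matrix (matrix : List (List Int)) : Prop :=
  matrix ≠ [] ∧ ∀ row ∈ matrix, (matrix.headD []).length ≤ row.length
instance (matrix : List (List Int)) : Decidable (Pre_cluster_matrix matrix) := by
  unfold Pre_cluster_matrix; infer_instance

def pvWitness_cluster_matrix : List (List Int) := [[1, 2], [1, 2], [3, 4]]

def Spec_cluster_matrix (matrix : List (List Int)) (out : List Bool × List Bool) : Prop := out = cluster_matrix_alt matrix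
instance (matrix : List (List Int)) (out : List Bool × List Bool) : Decidable (Spec_cluster_matrix matrix out) := by unfold Spec_cluster_matrix; infer_instance

-- ===== CLAIM (what is proved, stated in full; the proofs are below) =====
def Claim_equal_cluster_matrix : Prop := ∀ (matrix : List (List Int)), Dom_cluster_matrix matrix → Pre_cluster_matrix matrix → Spec_cluster_matrix matrix (cluster_matrix matrix)

-- ===== LEMMAS AND PROOFS =====

-- common specification: flag j ↔ some earlier key equals key j
def pvSpec (keys : List (List Int)) : List Bool :=
  (List.range keys.length).map (fun j => decide (∃ i, i < j ∧ keys.getD i [] = keys.getD j []))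

theorem pvRowEqA_all (matrix : List (List Int)) (i j : Int) (cs : List Int) :
    pvRowEqA matrix i j cs
      = cs.all (fun c => PySem.List.pyGetD (PySem.List.pyGetD matrix i []) c 0
          == PySem.List.pyGetD (PySem.List.pyGetD matrix j []) c 0) := by
  induction cs with
  | nil => rfl
  | cons c rest ih =>
    rw [pvRowEqA, List.all_cons]
    split_ifs with h
    · simp [beq_eq_false_iff_ne.mpr h]
    · rw [not_ne_iff] at h
      simp [ih, h]

theorem pvColEqA_all (matrix : List (List Int)) (c c' : Int) (rs : List Int) :
    pvColEqA matrix c c' rs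
      = rs.all (fun r => PySem.List.pyGetD (PySem.List.pyGetD matrix r []) c 0
          == PySem.List.pyGetD (PySem.List.pyGetD matrix r []) c' 0) := by
  induction rs with
  | nil => rfl
  | cons r rest ih =>
    rw [pvColEqA, List.all_cons]
    split_ifs with h
    · simp [beq_eq_false_iff_ne.mpr h]
    · rw [not_ne_iff] at h
      simp [ih, h]

-- prefix equality by entries
theorem pvTakeEq (xs ys : List Int) (m : Nat) (hx : m ≤ xs.length) (hy : m ≤ ys.length) :
    xs.take m = ys.take m ↔ ∀ c : Nat, c < m → xs.getD c 0 = ys.getD c 0 := by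
  constructor
  · intro h c hc
    have hcx : c < (xs.take m).length := by simp; omega
    have hcy : c < (ys.take m).length := by simp; omega
    have e := congrArg (fun l => l.getD c 0) h
    simp only at e
    rw [List.getD_eq_getElem _ _ hcx, List.getD_eq_getElem _ _ hcy] at e
    rw [List.getD_eq_getElem _ _ (by omega : c < xs.length),
        List.getD_eq_getElem _ _ (by omega : c < ys.length)]
    simpa [List.getElem_take] using e
  · intro h
    apply List.ext_getElem (by simp [hx, hy])
    intro c h1 h2
    have hc : c < m := by simp at h1; omega
    have e := h c hc
    rw [List.getD_eq_getElem _ _ (by omega), List.getD_eq_getElem _ _ (by omega)] at e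
    simpa [List.getElem_take] using e

-- lexicographic facts about appended tags
theorem pvLexAppend (k : List Int) (x y : Int) : k ++ [x] < k ++ [y] ↔ x < y := by
  induction k with
  | nil => simp [List.cons_lt_cons_iff]
  | cons a k ih => simpa [List.cons_lt_cons_iff] using ih

theorem pvLexSandwich (k : List Int) (x y : Int) :
    ∀ w : List Int, w.length = k.length + 1 → k ++ [x] ≤ w → w < k ++ [y] → w.dropLast = k := by
  induction k with
  | nil =>
    intro w hw _ _
    match w, hw with
    | [w0], _ => rfl
  | cons a k ih =>
    intro w hw hle hlt
    match w, hw, hle, hlt with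
    | w0 :: w', hw, hle, hlt =>
      rcases lt_or_eq_of_le hle with hlt' | heq
      · rw [List.cons_append, List.cons_lt_cons_iff] at hlt'
        rw [List.cons_append, List.cons_lt_cons_iff] at hlt
        have ha : w0 = a := by
          rcases hlt' with h | ⟨h, _⟩ <;> rcases hlt with h' | ⟨h', _⟩ <;> omega
        rcases hlt' with h | ⟨_, hle'⟩
        · omega
        rcases hlt with h' | ⟨_, hlt''⟩
        · omega
        have hw' : w'.length = k.length + 1 := by simpa using hw
        have hd := ih w' hw' (le_of_lt hle') hlt''
        have hne : w' ≠ [] := by intro h; rw [h] at hw'; simp at hw'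
        rw [List.dropLast_cons_of_ne_nil hne, hd, ha]
      · rw [← heq]
        exact List.dropLast_concat

-- the neighbour-marking scan of B
theorem pvRangeNil (a b : Int) (h : b ≤ a) : PySem.List.pyRange a b = [] := by
  refine List.eq_nil_iff_forall_not_mem.mpr ?_
  intro x hx
  rw [PySem.List.mem_pyRange_one] at hx
  omega
theorem pvMapGetD_range (d : List Bool) :
    (List.range d.length).map (fun j => d.getD j false) = d := by
  apply List.ext_getElem (by simp)
  intro j h1 h2
  simp [List.getElem?_eq_getElem h2]
theorem pvGetD_map_range (n : Nat) (f : Nat → Bool) (j : Nat) (h : j < n) :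
    ((List.range n).map f).getD j false = f j := by
  simp [List.getD_eq_getElem?_getD, List.getElem?_map, List.getElem?_range h]
theorem pvGetD_set (l : List Bool) (a j : Nat) (v : Bool) (ha : a < l.length) :
    (l.set a v).getD j false = if a = j then v else l.getD j false := by
  by_cases hj : j < l.length
  · rw [List.getD_eq_getElem _ _ (by simpa using hj), List.getElem_set]
    split_ifs with h1
    · rfl
    · rw [List.getD_eq_getElem _ _ hj]
  · rw [if_neg (by omega)]
    rw [List.getD_eq_default _ _ (by simpa using (by omega : l.length ≤ j)),
        List.getD_eq_default _ _ (by omega)]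

theorem pvInner (eqf : Int → Bool) (n : Nat) :
    ∀ (k : Nat) (lo : Int), 0 ≤ lo → (n : Int) - lo ≤ k → ∀ (d : List Bool), d.length = n →
    ((PySem.List.pyRange lo n).foldl
        (fun d q => if PySem.List.pyGetD d q false then d
          else if eqf q then PySem.List.pySetD d q true else d) d)
      = (List.range n).map (fun j => d.getD j false || (decide (lo ≤ (j : Int)) && eqf j)) := by
  intro k
  induction k with
  | zero =>
    intro lo hlo hk d hd
    rw [pvRangeNil _ _ (by omega), List.foldl_nil]
    conv_lhs => rw [← pvMapGetD_range d]
    rw [hd]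
    apply List.map_congr_left
    intro j hj
    have : ¬ (lo ≤ (j : Int)) := by
      simp at hj; omega
    simp [this]
  | succ k ih =>
    intro lo hlo hk d hd
    by_cases hlt : lo < (n : Int)
    · rw [PySem.List.pyRange_one_cons hlt, List.foldl_cons]
      set d' : List Bool := (if PySem.List.pyGetD d lo false then d
          else if eqf lo then PySem.List.pySetD d lo true else d) with hd'
      have hlen' : d'.length = n := by
        rw [hd']; split_ifs <;> simp [PySem.List.length_pySetD, hd]
      have hlonat : ((lo.toNat : Nat) : Int) = lo := Int.toNat_of_nonneg hlo
      have hpy : PySem.List.pyGetD d lo false = d.getD lo.toNat false := by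
        rw [← hlonat, PySem.List.pyGetD_natCast]; simp
        rw [show (max lo 0).toNat = lo.toNat by omega]
      have hget : ∀ j : Nat, j < n →
          d'.getD j false = (d.getD j false || (decide ((j : Int) = lo) && eqf lo)) := by
        intro j hj
        rw [hd', hpy]
        split_ifs with h1 h2
        · by_cases hjl : j = lo.toNat
          · rw [hjl, h1]; simp
          · have hne : ¬((j : Int) = lo) := by omega
            simp [hne]
        · rw [PySem.List.pySetD_of_nonneg _ _ hlo, pvGetD_set _ _ _ _ (by rw [hd]; omega)]
          by_cases hjl : j = lo.toNat
          · have heq : ((j : Int) = lo) := by omega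
            rw [if_pos hjl.symm]
            simp [heq, h2]
          · have hne : ¬((j : Int) = lo) := by omega
            rw [if_neg (fun hh => hjl hh.symm)]
            simp [hne]
        · have h2' : eqf lo = false := by simpa using h2
          simp [h2']
      rw [ih (lo + 1) (by omega) (by omega) d' hlen']
      apply List.map_congr_left
      intro j hj
      have hjn : j < n := by simpa using hj
      rw [hget j hjn]
      by_cases hjl : (j : Int) = lo
      · have h1 : decide ((j:Int) = lo) = true := by simp [hjl]
        have h2 : ¬ (lo + 1 ≤ (j : Int)) := by omega
        have h3 : (lo ≤ (j : Int)) := by omega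
        rw [hjl]
        simp
      · have h2 : (lo + 1 ≤ (j : Int)) ↔ (lo ≤ (j : Int)) := by omega
        simp [hjl, h2]
    · rw [pvRangeNil _ _ (by omega), List.foldl_nil]
      conv_lhs => rw [← pvMapGetD_range d]
      rw [hd]
      apply List.map_congr_left
      intro j hj
      have : ¬ (lo ≤ (j : Int)) := by simp at hj; omega
      simp [this]

theorem pvOuter (eqf : Int → Int → Bool) (n : Nat) :
    ∀ (k : Nat) (lo : Int), 0 ≤ lo → (n : Int) - lo ≤ k → ∀ (d : List Bool), d.length = n →
    (∀ j : Nat, j < n →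
      d.getD j false = decide (∃ i : Nat, i < j ∧ (i : Int) < lo ∧ eqf i j = true)) →
    ((PySem.List.pyRange lo n).foldl
        (fun d i => (PySem.List.pyRange (i + 1) n).foldl
          (fun d q => if PySem.List.pyGetD d q false then d
            else if eqf i q then PySem.List.pySetD d q true else d) d) d)
      = (List.range n).map (fun j => decide (∃ i : Nat, i < j ∧ eqf i j = true)) := by
  intro k
  induction k with
  | zero =>
    intro lo hlo hk d hd hinv
    rw [pvRangeNil _ _ (by omega), List.foldl_nil]
    conv_lhs => rw [← pvMapGetD_range d]
    rw [hd]
    apply List.map_congr_left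
    intro j hj
    have hjn : j < n := by simpa using hj
    rw [hinv j hjn]
    apply decide_eq_decide.mpr
    constructor
    · rintro ⟨i, h1, _, h3⟩; exact ⟨i, h1, h3⟩
    · rintro ⟨i, h1, h3⟩; exact ⟨i, h1, by omega, h3⟩
  | succ k ih =>
    intro lo hlo hk d hd hinv
    by_cases hlt : lo < (n : Int)
    · rw [PySem.List.pyRange_one_cons hlt, List.foldl_cons]
      rw [pvInner (eqf lo) n n (lo + 1) (by omega) (by omega) d hd]
      apply ih (lo + 1) (by omega) (by omega) _ (by simp)
      intro j hj
      rw [pvGetD_map_range _ _ _ hj, hinv j hj]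
      have hlonat : ((lo.toNat : Nat) : Int) = lo := Int.toNat_of_nonneg hlo
      rcases Bool.eq_false_or_eq_true (eqf lo j) with hef | hef
      · rw [hef]
        simp only [Bool.and_true]
        rcases (by omega : (j : Int) < lo + 1 ∨ lo + 1 ≤ (j : Int)) with hjlo | hjlo
        · rw [decide_eq_false (by omega : ¬ (lo + 1 ≤ (j : Int)))]
          simp only [Bool.or_false]
          apply decide_eq_decide.mpr
          constructor
          · rintro ⟨i, h1, h2, h3⟩; exact ⟨i, h1, by omega, h3⟩
          · rintro ⟨i, h1, h2, h3⟩; exact ⟨i, h1, by omega, h3⟩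
        · rw [decide_eq_true (by omega : lo + 1 ≤ (j : Int))]
          simp only [Bool.or_true]
          symm
          apply decide_eq_true
          exact ⟨lo.toNat, by omega, by omega, by rw [hlonat]; exact hef⟩
      · rw [hef]
        simp only [Bool.and_false, Bool.or_false]
        apply decide_eq_decide.mpr
        constructor
        · rintro ⟨i, h1, h2, h3⟩
          refine ⟨i, h1, by omega, h3⟩
        · rintro ⟨i, h1, h2, h3⟩
          refine ⟨i, h1, ?_, h3⟩
          rcases (by omega : (i : Int) < lo ∨ (i : Int) = lo) with h | h
          · exact h
          · exfalso
            have hi : i = lo.toNat := by omega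
            rw [hi, hlonat] at h3
            rw [h3] at hef
            simp at hef
    · rw [pvRangeNil _ _ (by omega), List.foldl_nil]
      conv_lhs => rw [← pvMapGetD_range d]
      rw [hd]
      apply List.map_congr_left
      intro j hj
      have hjn : j < n := by simpa using hj
      rw [hinv j hjn]
      apply decide_eq_decide.mpr
      constructor
      · rintro ⟨i, h1, _, h3⟩; exact ⟨i, h1, h3⟩
      · rintro ⟨i, h1, h3⟩; exact ⟨i, h1, by omega, h3⟩

theorem pvScan (C : Int → Prop) [DecidablePred C] (idx : Int → Int)
    (step : List Bool → Int → List Bool)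
    (hstep : ∀ f p, step f p = if C p then PySem.List.pySetD f (idx p) true else f)
    (n : Nat)
    (hidx : ∀ p : Nat, p < n → C p → ∃ jp : Nat, jp < n ∧ idx p = (jp : Int)) :
    ∀ (k : Nat) (lo : Int), 0 ≤ lo → (n : Int) - lo ≤ k → ∀ (f : List Bool), f.length = n →
    ((PySem.List.pyRange lo n).foldl step f)
      = (List.range n).map (fun j => f.getD j false
          || decide (∃ p : Nat, p < n ∧ lo ≤ (p : Int) ∧ C p ∧ idx p = (j : Int))) := by
  intro k
  induction k with
  | zero =>
    intro lo hlo hk f hf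
    rw [pvRangeNil _ _ (by omega), List.foldl_nil]
    conv_lhs => rw [← pvMapGetD_range f]
    rw [hf]
    apply List.map_congr_left
    intro j hj
    have : ¬ (∃ p : Nat, p < n ∧ lo ≤ (p : Int) ∧ C p ∧ idx p = (j : Int)) := by
      rintro ⟨p, h1, h2, _⟩; omega
    simp [this]
  | succ k ih =>
    intro lo hlo hk f hf
    by_cases hlt : lo < (n : Int)
    · rw [PySem.List.pyRange_one_cons hlt, List.foldl_cons]
      have hlonat : ((lo.toNat : Nat) : Int) = lo := Int.toNat_of_nonneg hlo
      have hlen' : (step f lo).length = n := by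
        rw [hstep]; split_ifs <;> simp [PySem.List.length_pySetD, hf]
      rw [ih (lo + 1) (by omega) (by omega) _ hlen']
      apply List.map_congr_left
      intro j hj
      have hjn : j < n := by simpa using hj
      have hget : (step f lo).getD j false
          = (f.getD j false || decide (C lo ∧ idx lo = (j : Int))) := by
        rw [hstep]
        split_ifs with h1
        · obtain ⟨jp, hjp, hjpe⟩ := hidx lo.toNat (by omega) (by rw [hlonat]; exact h1)
          rw [hlonat] at hjpe
          rw [hjpe, PySem.List.pySetD_of_nonneg _ _ (by omega), Int.toNat_natCast,
              pvGetD_set _ _ _ _ (by omega)]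
          by_cases hje : jp = j
          · rw [if_pos hje]
            have hthis : C lo ∧ idx lo = (j : Int) := ⟨h1, by rw [hjpe, hje]⟩
            simp [hthis]
            exact Or.inr hje
          · rw [if_neg hje]
            have hthis : ¬ (C lo ∧ idx lo = (j : Int)) := by
              rintro ⟨_, hc⟩; rw [hjpe] at hc; exact hje (by exact_mod_cast hc)
            simp [hthis]
            intro _ hjj
            exact absurd hjj hje
        · have : ¬ (C lo ∧ idx lo = (j : Int)) := by rintro ⟨hc, _⟩; exact h1 hc
          simp [this]
      rw [hget]
      rcases Decidable.em (C lo ∧ idx lo = (j : Int)) with hc | hc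
      · have h1 : decide (C lo ∧ idx lo = (j : Int)) = true := decide_eq_true hc
        have h2 : (∃ p : Nat, p < n ∧ lo ≤ (p : Int) ∧ C p ∧ idx p = (j : Int)) :=
          ⟨lo.toNat, by omega, by omega, by rw [hlonat]; exact hc.1, by rw [hlonat]; exact hc.2⟩
        simp [h1, h2]
      · have h1 : decide (C lo ∧ idx lo = (j : Int)) = false := decide_eq_false hc
        rw [h1]
        simp only [Bool.or_false]
        congr 1
        apply decide_eq_decide.mpr
        constructor
        · rintro ⟨p, hp1, hp2, hp3, hp4⟩; exact ⟨p, hp1, by omega, hp3, hp4⟩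
        · rintro ⟨p, hp1, hp2, hp3, hp4⟩
          refine ⟨p, hp1, ?_, hp3, hp4⟩
          rcases (by omega : lo + 1 ≤ (p : Int) ∨ (p : Int) = lo) with h | h
          · exact h
          · exfalso
            rw [← h] at hlonat
            rw [show (p:Int) = lo from h] at hp3 hp4
            exact hc ⟨hp3, hp4⟩
    · rw [pvRangeNil _ _ (by omega), List.foldl_nil]
      conv_lhs => rw [← pvMapGetD_range f]
      rw [hf]
      apply List.map_congr_left
      intro j hj
      have : ¬ (∃ p : Nat, p < n ∧ lo ≤ (p : Int) ∧ C p ∧ idx p = (j : Int)) := by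
        rintro ⟨p, h1, h2, _⟩; omega
      simp [this]

theorem pvSortedInst (xs : List (List Int)) :
    PySem.List.sorted xs (fun x => x) false
      = @PySem.List.sorted (List Int) (List Int) _ LinearOrder.toDecidableLT xs (fun x => x) false := by
  congr 1

theorem pvB (keys : List (List Int)) (m : Nat) (hm : ∀ k ∈ keys, k.length = m) :
    pvDupFlagsB keys = pvSpec keys := by
  simp only [pvDupFlagsB]
  set n := keys.length with hn
  set tagged := keys.zipIdx.map (fun ki => ki.1 ++ [(ki.2 : Int)]) with htagged
  set s := PySem.List.sorted tagged (fun x => x) false with hs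
  have htlen : tagged.length = n := by simp [htagged, hn]
  have hslen : s.length = n := by rw [hs, PySem.List.length_sorted, htlen]
  have htget : ∀ j (hj : j < n), tagged[j]'(by omega) = keys[j]'hj ++ [(j : Int)] := by
    intro j hj
    simp [htagged, List.getElem_map, List.getElem_zipIdx]
  have hperm : s.Perm tagged := PySem.List.sorted_perm tagged (fun x => x) false
  have hnodup : tagged.Nodup := by
    have hpw : tagged.Pairwise (fun a b => a ≠ b) := by
      rw [List.pairwise_iff_getElem]
      intro i j hi hj hij
      rw [htget i (by omega), htget j (by omega)]
      intro he
      have h2 := List.append_inj_right' he (by simp)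
      simp at h2
      omega
    exact hpw
  have hsnodup : s.Nodup := hperm.nodup_iff.mpr hnodup
  have hpw : s.Pairwise (fun a b => a ≤ b) := by
    rw [hs, pvSortedInst tagged]
    exact PySem.List.sorted_pairwise tagged (fun x => x)
  have hmono : ∀ p q (hq : q < n) (hpq : p ≤ q), s[p]'(by omega) ≤ s[q]'(by omega) := by
    intro p q hq hpq
    rcases Nat.lt_or_ge p q with h | h
    · exact (List.pairwise_iff_getElem.mp hpw) p q (by omega) (by omega) h
    · have : p = q := by omega
      subst this
      exact le_refl _
  have hstrict : ∀ p q (hq : q < n) (hpq : p < q), s[p]'(by omega) < s[q]'(by omega) := by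
    intro p q hq hpq
    refine lt_of_le_of_ne (hmono p q hq (by omega)) ?_
    intro he
    have h2 : p = q := (List.Nodup.getElem_inj_iff hsnodup).mp he
    omega
  have hsget : ∀ p (hp : p < n), ∃ a, ∃ ha : a < n, s[p]'(by omega) = keys[a]'ha ++ [(a : Int)] := by
    intro p hp
    have hmem : s[p]'(by omega) ∈ tagged := hperm.mem_iff.mp (List.getElem_mem (by omega))
    obtain ⟨a, ha, he⟩ := List.mem_iff_getElem.mp hmem
    exact ⟨a, by omega, by rw [← he, htget a (by omega)]⟩
  have hpos : ∀ j (hj : j < n), ∃ p, ∃ hp : p < n, s[p]'(by omega) = keys[j]'hj ++ [(j : Int)] := by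
    intro j hj
    have hmem : tagged[j]'(by omega) ∈ s := hperm.mem_iff.mpr (List.getElem_mem (by omega))
    obtain ⟨p, hp, he⟩ := List.mem_iff_getElem.mp hmem
    exact ⟨p, by omega, by rw [he, htget j hj]⟩
  -- characterize the two getters used by the scan
  have hsgetD : ∀ p (hp : p < n), PySem.List.pyGetD s (p : Int) [] = s[p]'(by omega) := by
    intro p hp
    rw [PySem.List.pyGetD_natCast, List.getD_eq_getElem _ _ (by omega)]
  rw [pvScan
        (C := fun p => PySem.List.slice (PySem.List.pyGetD s p []) none (some (-1))
           = PySem.List.slice (PySem.List.pyGetD s (p - 1) []) none (some (-1)))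
        (idx := fun p => PySem.List.pyGetD (PySem.List.pyGetD s p []) (-1) 0)
        (step := fun flags p =>
          if PySem.List.slice (PySem.List.pyGetD s p []) none (some (-1))
             = PySem.List.slice (PySem.List.pyGetD s (p - 1) []) none (some (-1))
          then PySem.List.pySetD flags (PySem.List.pyGetD (PySem.List.pyGetD s p []) (-1) 0) true
          else flags)
        (fun f p => rfl) n ?hidx n 1 (by omega) (by omega) (List.replicate n false) (by simp)]
  case hidx =>
    intro p hp _
    obtain ⟨a, ha, he⟩ := hsget p hp
    refine ⟨a, ha, ?_⟩
    show PySem.List.pyGetD (PySem.List.pyGetD s (p : Int) []) (-1) 0 = (a : Int)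
    rw [hsgetD p hp, he, PySem.List.pyGetD_neg_one_append_singleton]
  simp only [pvSpec, ← hn]
  apply List.map_congr_left
  intro j hj
  have hjn : j < n := by simpa using hj
  have hrep : (List.replicate n false).getD j false = false := by
    simp [List.getD_eq_getElem?_getD, hjn]
  rw [hrep, Bool.false_or]
  apply decide_eq_decide.mpr
  constructor
  · rintro ⟨p, hp, hp1, hC, hIdx⟩
    have hp1' : 1 ≤ p := by omega
    obtain ⟨a, ha, hsa⟩ := hsget p hp
    obtain ⟨b, hb, hsb⟩ := hsget (p - 1) (by omega)
    rw [hsgetD p hp, hsa, PySem.List.pyGetD_neg_one_append_singleton] at hIdx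
    have haj : a = j := by exact_mod_cast hIdx
    subst haj
    have hpm1 : ((p : Int) - 1) = ((p - 1 : Nat) : Int) := by omega
    rw [hsgetD p hp, hpm1, hsgetD (p - 1) (by omega), hsa, hsb,
        PySem.List.slice_to_neg_one, PySem.List.slice_to_neg_one,
        List.dropLast_concat, List.dropLast_concat] at hC
    have hblt : b < a := by
      have := hstrict (p - 1) p hp (by omega)
      rw [hsa, hsb, hC, pvLexAppend] at this
      exact_mod_cast this
    refine ⟨b, hblt, ?_⟩
    rw [List.getD_eq_getElem _ _ (by omega), List.getD_eq_getElem _ _ (by omega), hC]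
  · rintro ⟨i, hij, hkeq⟩
    have hin : i < n := by omega
    rw [List.getD_eq_getElem _ _ (by omega), List.getD_eq_getElem _ _ (by omega)] at hkeq
    obtain ⟨q, hq, hsq⟩ := hpos i hin
    obtain ⟨p, hp, hsp⟩ := hpos j hjn
    rw [hkeq] at hsq
    have hlt : s[q]'(by omega) < s[p]'(by omega) := by
      rw [hsq, hsp, pvLexAppend]
      exact_mod_cast hij
    have hqp : q < p := by
      by_contra hcon
      have hle' := hmono p q hq (by omega)
      exact absurd hlt (not_lt.mpr hle')
    have hp1 : 1 ≤ p := by omega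
    obtain ⟨b, hbn, hsb⟩ := hsget (p - 1) (by omega)
    have hkbm : (keys[b]'hbn).length = m := hm _ (List.getElem_mem hbn)
    have hkjm : (keys[j]'hjn).length = m := hm _ (List.getElem_mem hjn)
    have hwlen : (s[p-1]'(by omega)).length = (keys[j]'hjn).length + 1 := by
      rw [hsb]; simp [hkbm, hkjm]
    have hle : (keys[j]'hjn) ++ [(i : Int)] ≤ s[p-1]'(by omega) := by
      rw [← hsq]; exact hmono q (p - 1) (by omega) (by omega)
    have hlt2 : s[p-1]'(by omega) < (keys[j]'hjn) ++ [(j : Int)] := by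
      rw [← hsp]; exact hstrict (p - 1) p hp (by omega)
    have hdrop := pvLexSandwich (keys[j]'hjn) (i : Int) (j : Int) _ hwlen hle hlt2
    have hpm1 : ((p : Int) - 1) = ((p - 1 : Nat) : Int) := by omega
    refine ⟨p, hp, by omega, ?_, ?_⟩
    · show PySem.List.slice (PySem.List.pyGetD s (p : Int) []) none (some (-1))
         = PySem.List.slice (PySem.List.pyGetD s ((p : Int) - 1) []) none (some (-1))
      rw [hsgetD p hp, hpm1, hsgetD (p - 1) (by omega), hsp,
          PySem.List.slice_to_neg_one, PySem.List.slice_to_neg_one,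
          List.dropLast_concat, hdrop]
    · show PySem.List.pyGetD (PySem.List.pyGetD s (p : Int) []) (-1) 0 = (j : Int)
      rw [hsgetD p hp, hsp, PySem.List.pyGetD_neg_one_append_singleton]

theorem pvAllRange (m : Nat) (f : Int → Bool) :
    (PySem.List.pyRange 0 (m : Int)).all f = true ↔ ∀ c : Nat, c < m → f c = true := by
  rw [List.all_eq_true]
  constructor
  · intro h c hc
    exact h _ (PySem.List.mem_pyRange_one.mpr ⟨by omega, by omega⟩)
  · intro h x hx
    rw [PySem.List.mem_pyRange_one] at hx
    rw [show x = ((x.toNat : Nat) : Int) by omega]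
    exact h x.toNat (by omega)

theorem pvMapEq (matrix : List (List Int)) (c c' : Nat) :
    (matrix.map (fun r => r.getD c 0) = matrix.map (fun r => r.getD c' 0))
      ↔ ∀ rI : Nat, (hr : rI < matrix.length) →
          (matrix[rI]'hr).getD c 0 = (matrix[rI]'hr).getD c' 0 := by
  constructor
  · intro h rI hr
    have h2 := congrArg (fun l => l.getD rI (0 : Int)) h
    simp only at h2
    rw [List.getD_eq_getElem _ _ (by simpa using hr), List.getD_eq_getElem _ _ (by simpa using hr),
        List.getElem_map, List.getElem_map] at h2
    exact h2
  · intro h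
    apply List.ext_getElem (by simp)
    intro rI h1 h2
    simp only [List.getElem_map]
    exact h rI (by simpa using h1)

theorem pvRowEqChar (matrix : List (List Int)) (m : Nat)
    (hrows : ∀ row ∈ matrix, m ≤ row.length) (i j : Nat)
    (hi : i < matrix.length) (hj : j < matrix.length) :
    (pvRowEqA matrix i j (PySem.List.pyRange 0 (m : Int)) = true)
      ↔ (matrix[i]'hi).take m = (matrix[j]'hj).take m := by
  rw [pvRowEqA_all, pvAllRange]
  rw [pvTakeEq _ _ m (hrows _ (List.getElem_mem hi)) (hrows _ (List.getElem_mem hj))]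
  have e : ∀ (a : Nat) (ha : a < matrix.length) (cn : Nat),
      PySem.List.pyGetD (PySem.List.pyGetD matrix (a : Int) []) (cn : Int) 0
        = (matrix[a]'ha).getD cn 0 := by
    intro a ha cn
    rw [PySem.List.pyGetD_natCast matrix, List.getD_eq_getElem _ _ ha, PySem.List.pyGetD_natCast]
  constructor
  · intro h c hc
    have h2 := h c hc
    rw [beq_iff_eq, e i hi c, e j hj c] at h2
    exact h2
  · intro h c hc
    rw [beq_iff_eq, e i hi c, e j hj c]
    exact h c hc

theorem pvColEqChar (matrix : List (List Int)) (c c' : Nat) :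
    (pvColEqA matrix c c' (PySem.List.pyRange 0 (matrix.length : Int)) = true)
      ↔ matrix.map (fun r => r.getD c 0) = matrix.map (fun r => r.getD c' 0) := by
  rw [pvColEqA_all, pvAllRange, pvMapEq]
  have e : ∀ (a : Nat) (ha : a < matrix.length) (cn : Nat),
      PySem.List.pyGetD (PySem.List.pyGetD matrix (a : Int) []) (cn : Int) 0
        = (matrix[a]'ha).getD cn 0 := by
    intro a ha cn
    rw [PySem.List.pyGetD_natCast matrix, List.getD_eq_getElem _ _ ha, PySem.List.pyGetD_natCast]
  constructor
  · intro h rI hr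
    have h2 := h rI hr
    rw [beq_iff_eq, e rI hr c, e rI hr c'] at h2
    exact h2
  · intro h rI hr
    rw [beq_iff_eq, e rI hr c, e rI hr c']
    exact h rI hr

theorem pvHead (matrix : List (List Int)) :
    PySem.List.pyGetD matrix 0 [] = matrix.headD [] := by
  cases matrix <;> simp [PySem.List.pyGetD_zero]

theorem pvA (matrix : List (List Int)) (_hne : matrix ≠ [])
    (hrows : ∀ row ∈ matrix, (matrix.headD []).length ≤ row.length) :
    cluster_matrix matrix
      = (pvSpec (matrix.map (fun r => r.take (matrix.headD []).length)),
         pvSpec ((List.range (matrix.headD []).length).map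
             (fun c => matrix.map (fun r => r.getD c 0)))) := by
  simp only [cluster_matrix, pvHead]
  have hkr : ∀ a (ha : a < matrix.length),
      (matrix.map (fun r => r.take (matrix.headD []).length)).getD a []
        = (matrix[a]'ha).take (matrix.headD []).length := by
    intro a ha
    rw [List.getD_eq_getElem _ _ (by simpa using ha), List.getElem_map]
  have hkc : ∀ a (ha : a < (matrix.headD []).length),
      (((List.range (matrix.headD []).length).map
          (fun c => matrix.map (fun r => r.getD c 0)))).getD a []
        = matrix.map (fun r => r.getD a 0) := by
    intro a ha
    rw [List.getD_eq_getElem _ _ (by simpa using ha), List.getElem_map, List.getElem_range]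
  simp only [Prod.mk.injEq]
  refine ⟨?_, ?_⟩
  case _ =>
    have hinv : ∀ j : Nat, j < matrix.length →
        (List.replicate matrix.length false).getD j false
          = decide (∃ i : Nat, i < j ∧ (i : Int) < 0 ∧
              pvRowEqA matrix i j (PySem.List.pyRange 0 ((matrix.headD []).length : Int) 1) = true) := by
      intro j hj
      rw [List.getD_eq_getElem _ _ (by simpa using hj), List.getElem_replicate]
      symm
      apply decide_eq_false
      rintro ⟨i, h1, h2, h3⟩
      omega
    rw [pvOuter (fun i q => pvRowEqA matrix i q (PySem.List.pyRange 0 ((matrix.headD []).length : Int) 1))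
          matrix.length matrix.length 0 (by omega) (by omega) (List.replicate matrix.length false)
          (by simp) hinv]
    simp only [pvSpec]
    simp only [List.length_map]
    apply List.map_congr_left
    intro j hj
    have hjn : j < matrix.length := by simpa using hj
    apply decide_eq_decide.mpr
    constructor
    · rintro ⟨i, h1, h2⟩
      refine ⟨i, h1, ?_⟩
      rw [hkr i (by omega), hkr j hjn]
      exact (pvRowEqChar matrix _ hrows i j (by omega) hjn).mp h2
    · rintro ⟨i, h1, h2⟩
      refine ⟨i, h1, ?_⟩
      rw [hkr i (by omega), hkr j hjn] at h2
      exact (pvRowEqChar matrix _ hrows i j (by omega) hjn).mpr h2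
  case _ =>
    rw [show (((matrix.headD []).length : Int)).toNat = (matrix.headD []).length from by omega]
    have hinv : ∀ j : Nat, j < (matrix.headD []).length →
        (List.replicate (matrix.headD []).length false).getD j false
          = decide (∃ i : Nat, i < j ∧ (i : Int) < 0 ∧
              pvColEqA matrix i j (PySem.List.pyRange 0 (matrix.length : Int) 1) = true) := by
      intro j hj
      rw [List.getD_eq_getElem _ _ (by simpa using hj), List.getElem_replicate]
      symm
      apply decide_eq_false
      rintro ⟨i, h1, h2, h3⟩
      omega
    rw [pvOuter (fun c q => pvColEqA matrix c q (PySem.List.pyRange 0 (matrix.length : Int) 1))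
          (matrix.headD []).length (matrix.headD []).length 0 (by omega) (by omega)
          (List.replicate (matrix.headD []).length false) (by simp) hinv]
    simp only [pvSpec]
    simp only [List.length_map, List.length_range]
    apply List.map_congr_left
    intro j hj
    have hjm : j < (matrix.headD []).length := by simpa using hj
    apply decide_eq_decide.mpr
    constructor
    · rintro ⟨i, h1, h2⟩
      refine ⟨i, h1, ?_⟩
      rw [hkc i (by omega), hkc j hjm]
      exact (pvColEqChar matrix i j).mp h2
    · rintro ⟨i, h1, h2⟩
      refine ⟨i, h1, ?_⟩
      rw [hkc i (by omega), hkc j hjm] at h2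
      exact (pvColEqChar matrix i j).mpr h2

theorem pvBalt (matrix : List (List Int)) :
    cluster_matrix_alt matrix
      = (pvDupFlagsB (matrix.map (fun r => r.take (matrix.headD []).length)),
         pvDupFlagsB ((List.range (matrix.headD []).length).map
             (fun c => matrix.map (fun r => r.getD c 0)))) := by
  simp only [cluster_matrix_alt, pvHead]
  simp only [Prod.mk.injEq]
  refine ⟨?_, ?_⟩
  case _ =>
    congr 1
    apply List.map_congr_left
    intro row _
    exact PySem.List.slice_to_natCast row (matrix.headD []).length
  case _ =>
    congr 1
    rw [PySem.List.pyRange_zero_natCast, List.map_map]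
    apply List.map_congr_left
    intro c _
    simp only [Function.comp_apply]
    apply List.map_congr_left
    intro row _
    rw [PySem.List.pyGetD_natCast]

-- ===== VERDICT (by name: the statement is the Claim_ definition above) =====
theorem cluster_matrix_spec : Claim_equal_cluster_matrix := by
  intro matrix _ hpre
  obtain ⟨hne, hrows⟩ := hpre
  unfold Spec_cluster_matrix
  rw [pvA matrix hne hrows, pvBalt matrix]
  have hr : pvDupFlagsB (matrix.map (fun r => r.take (matrix.headD []).length))
      = pvSpec (matrix.map (fun r => r.take (matrix.headD []).length)) := by
    apply pvB _ (matrix.headD []).length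
    intro k hk
    rw [List.mem_map] at hk
    obtain ⟨r, hr, he⟩ := hk
    rw [← he, List.length_take]
    have := hrows r hr
    omega
  have hc : pvDupFlagsB ((List.range (matrix.headD []).length).map
        (fun c => matrix.map (fun r => r.getD c 0)))
      = pvSpec ((List.range (matrix.headD []).length).map
        (fun c => matrix.map (fun r => r.getD c 0))) := by
    apply pvB _ matrix.length
    intro k hk
    rw [List.mem_map] at hk
    obtain ⟨c, hc, he⟩ := hk
    rw [← he]
    simp
  rw [hr, hc]
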